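-- pv_equiv track=rewrite | github.com/iltoga/BusinessSuite | core/utils/passport_ocr.py | _is_mrz_obviously_corrupted
-- ===== SOURCE A (Python) =====
-- def _is_mrz_obviously_corrupted(parsed_mrz: dict) -> bool:
--     """Check if MRZ data is obviously corrupted (garbage OCR)."""
--     # Check for excessive repeated characters (KKKKKK, EEEEEE, etc.)
--     for key in ["names", "surname"]:
--         value = str(parsed_mrz.get(key, ""))
--         if len(value) > 5:
--             # Check for 4+ consecutive identical characters
--             for i in range(len(value) - 3):
--                 if value[i] == value[i + 1] == value[i + 2] == value[i + 3]:
--                     return True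
--
--     # Check sex field (must be M or F, not A or other garbage)
--     sex = parsed_mrz.get("sex", "")
--     if sex and sex not in ["M", "F"]:
--         return True
--
--     # Check if country/nationality codes look like garbage (not 3 letters)
--     for key in ["country", "nationality"]:
--         code = str(parsed_mrz.get(key, ""))
--         if code and (len(code) != 3 or not code.isalpha()):
--             return True
--
--     return False
-- ===== SOURCE B (Python) =====
-- def _is_mrz_obviously_corrupted(parsed_mrz: dict) -> bool:
--     """Check if MRZ data is obviously corrupted (garbage OCR)."""
--
--     def quad_run(value):
--         # candidate-substring search: a run of 4+ identical characters exists
--         # iff ch*4 is a substring for some character ch occurring in the value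
--         value = str(value)
--         return len(value) > 5 and any(ch * 4 in value for ch in set(value))
--
--     def code_ok(code):
--         code = str(code)
--         return not code or (len(code) == 3 and code.isalpha())
--
--     if quad_run(parsed_mrz.get("names", "")) or quad_run(parsed_mrz.get("surname", "")):
--         return True
--     sex = parsed_mrz.get("sex", "")
--     if sex and sex not in ("M", "F"):
--         return True
--     return not (code_ok(parsed_mrz.get("country", "")) and code_ok(parsed_mrz.get("nationality", "")))
-- ===== Notes on version B (the rewrite author's own statement) =====
-- stated objective: alternative
-- what changed: The repeated-character detector is a candidate-substring search (for each distinct character ch, test whether ch*4 occurs as a substring) instead of A's index-window scan, and the country/nationality checks are expressed through a positive validity predicate code_ok whose conjunction is negated.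
import Mathlib
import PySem

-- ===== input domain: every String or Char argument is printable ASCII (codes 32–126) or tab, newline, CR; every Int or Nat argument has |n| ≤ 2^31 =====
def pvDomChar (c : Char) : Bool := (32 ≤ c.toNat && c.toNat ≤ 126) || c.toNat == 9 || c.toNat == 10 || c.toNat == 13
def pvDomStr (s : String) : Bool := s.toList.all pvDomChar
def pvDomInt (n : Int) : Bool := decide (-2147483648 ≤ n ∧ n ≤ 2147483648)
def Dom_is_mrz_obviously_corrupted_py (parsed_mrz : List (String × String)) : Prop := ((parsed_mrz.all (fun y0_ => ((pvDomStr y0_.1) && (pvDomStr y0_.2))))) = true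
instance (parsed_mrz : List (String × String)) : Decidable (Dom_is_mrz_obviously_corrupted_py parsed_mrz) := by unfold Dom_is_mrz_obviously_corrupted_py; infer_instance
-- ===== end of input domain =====

-- B detects a 4-run by candidate-substring search (ch*4 in value, per distinct char) instead of
-- A's index-window scan, and negates a positive code-validity predicate (alternative algorithm, same cost class).


-- shared helper: parsed_mrz.get(key, "") (first-match association-list lookup)
def pvGetStr (m : List (String × String)) (k : String) : String :=
  (PySem.Dict.mk m).getD k ""

-- ===== PORT A =====
-- inner loop: for i in range(len(value)-3): if value[i]==value[i+1]==value[i+2]==value[i+3]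
-- (all indices are in range, so pyGetD's default is never used)
def aHasRepeat (value : String) : Bool :=
  let v := value.toList
  if 5 < v.length then
    (PySem.List.pyRange 0 ((v.length : Int) - 3) 1).any (fun i =>
      (PySem.List.pyGetD v i ' ' == PySem.List.pyGetD v (i + 1) ' ') &&
      (PySem.List.pyGetD v (i + 1) ' ' == PySem.List.pyGetD v (i + 2) ' ') &&
      (PySem.List.pyGetD v (i + 2) ' ' == PySem.List.pyGetD v (i + 3) ' '))
  else false

def is_mrz_obviously_corrupted_py (parsed_mrz : List (String × String)) : Bool :=
  if (["names", "surname"].any fun k => aHasRepeat (pvGetStr parsed_mrz k)) then true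
  else
    let sex := pvGetStr parsed_mrz "sex"
    if sex != "" && !(sex == "M" || sex == "F") then true
    else if (["country", "nationality"].any fun k =>
        let code := pvGetStr parsed_mrz k
        code != "" && (code.toList.length != 3 || !(PySem.Str.strIsalpha code))) then true
    else false

-- ===== PORT B =====
-- quad_run: len(value) > 5 and any(ch * 4 in value for ch in set(value))
def bQuadRun (value : String) : Bool :=
  let v := value.toList
  (5 < v.length) && (PySem.Set.ofList v).any (fun c => PySem.Chars.isIn (PySem.List.pyRepeat [c] 4) v)

-- code_ok: not code or (len(code) == 3 and code.isalpha())
def bCodeOk (code : String) : Bool :=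
  code == "" || (code.toList.length == 3 && PySem.Str.strIsalpha code)

def is_mrz_obviously_corrupted_py_alt (parsed_mrz : List (String × String)) : Bool :=
  if bQuadRun (pvGetStr parsed_mrz "names") || bQuadRun (pvGetStr parsed_mrz "surname") then true
  else
    let sex := pvGetStr parsed_mrz "sex"
    if sex != "" && !(sex == "M" || sex == "F") then true
    else !(bCodeOk (pvGetStr parsed_mrz "country") && bCodeOk (pvGetStr parsed_mrz "nationality"))

-- ===== PRECONDITION & SPEC =====
def Spec_is_mrz_obviously_corrupted_py (parsed_mrz : List (String × String)) (out : Bool) : Prop := out = is_mrz_obviously_corrupted_py_alt parsed_mrz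
instance (parsed_mrz : List (String × String)) (out : Bool) : Decidable (Spec_is_mrz_obviously_corrupted_py parsed_mrz out) := by unfold Spec_is_mrz_obviously_corrupted_py; infer_instance

-- ===== CLAIM (what is proved, stated in full; the proofs are below) =====
def Claim_equal_is_mrz_obviously_corrupted_py : Prop := ∀ (parsed_mrz : List (String × String)), Dom_is_mrz_obviously_corrupted_py parsed_mrz → Spec_is_mrz_obviously_corrupted_py parsed_mrz (is_mrz_obviously_corrupted_py parsed_mrz)

-- ===== LEMMAS AND PROOFS =====

-- reference predicate: some 4 consecutive equal characters
def hasQuad : List Char → Bool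
  | a :: b :: c :: d :: t => (a == b && b == c && c == d) || hasQuad (b :: c :: d :: t)
  | _ => false

-- Nat-indexed form of A's window scan
def natWin (v : List Char) : Bool :=
  (List.range (v.length - 3)).any (fun k =>
    (v.getD k ' ' == v.getD (k + 1) ' ') &&
    (v.getD (k + 1) ' ' == v.getD (k + 2) ' ') &&
    (v.getD (k + 2) ' ' == v.getD (k + 3) ' '))

lemma natWin_eq_hasQuad (v : List Char) : natWin v = hasQuad v := by
  induction v using hasQuad.induct with
  | case1 a b c d t ih =>
    have hlen : (a :: b :: c :: d :: t).length - 3 = t.length + 1 := by simp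
    unfold natWin
    rw [hlen, List.range_succ_eq_map, List.any_cons, List.any_map]
    unfold natWin at ih
    have hlen2 : (b :: c :: d :: t).length - 3 = t.length := by simp
    rw [hlen2] at ih
    rw [show hasQuad (a :: b :: c :: d :: t)
        = ((a == b && b == c && c == d) || hasQuad (b :: c :: d :: t)) from rfl, ← ih]
    congr 1
  | case2 v h =>
    rcases v with _ | ⟨a, _ | ⟨b, _ | ⟨c, _ | ⟨d, t⟩⟩⟩⟩
    · rfl
    · rfl
    · rfl
    · rfl
    · exact absurd rfl (fun hh : (_ : List Char) = _ => h a b c d t hh)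

lemma hasQuad_of_tail (x : Char) (t : List Char) (h : hasQuad t = true) :
    hasQuad (x :: t) = true := by
  rcases t with _ | ⟨a, _ | ⟨b, _ | ⟨c, _ | ⟨d, r⟩⟩⟩⟩ <;> simp_all [hasQuad]

lemma hasQuad_of_infix (c : Char) (l r : List Char) :
    hasQuad (l ++ [c, c, c, c] ++ r) = true := by
  induction l with
  | nil => simp [hasQuad]
  | cons x l ih =>
    rw [show (x :: l) ++ [c, c, c, c] ++ r = x :: (l ++ [c, c, c, c] ++ r) by simp]
    exact hasQuad_of_tail x _ ih

lemma hasQuad_iff_exists (v : List Char) :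
    hasQuad v = true ↔ ∃ c, c ∈ v ∧ [c, c, c, c] <:+: v := by
  constructor
  · intro h
    induction v using hasQuad.induct with
    | case1 a b c d t ih =>
      rw [show hasQuad (a :: b :: c :: d :: t)
          = ((a == b && b == c && c == d) || hasQuad (b :: c :: d :: t)) from rfl] at h
      rcases Bool.or_eq_true_iff.mp h with h1 | h2
      · simp only [Bool.and_eq_true, beq_iff_eq] at h1
        obtain ⟨⟨hab, hbc⟩, hcd⟩ := h1
        subst hab; subst hbc; subst hcd
        exact ⟨a, by simp, [], t, rfl⟩
      · obtain ⟨c', hm, l, r, hE⟩ := ih h2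
        exact ⟨c', List.mem_cons_of_mem a hm, a :: l, r, by rw [List.cons_append, List.cons_append, hE]⟩
    | case2 v hv =>
      rcases v with _ | ⟨a, _ | ⟨b, _ | ⟨c, _ | ⟨d, t⟩⟩⟩⟩
      · simp [hasQuad] at h
      · simp [hasQuad] at h
      · simp [hasQuad] at h
      · simp [hasQuad] at h
      · exact absurd rfl (fun hh : (_ : List Char) = _ => hv a b c d t hh)
  · rintro ⟨c, -, l, r, rfl⟩
    exact hasQuad_of_infix c l r

lemma bAny_eq_hasQuad (v : List Char) :
    ((PySem.Set.ofList v).any (fun c => PySem.Chars.isIn (PySem.List.pyRepeat [c] 4) v)) = hasQuad v := by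
  have hrep : ∀ c : Char, PySem.List.pyRepeat [c] (4 : Int) = [c, c, c, c] := by
    intro c
    rw [PySem.List.pyRepeat_singleton]
    rfl
  rw [Bool.eq_iff_iff, List.any_eq_true, hasQuad_iff_exists v]
  constructor
  · rintro ⟨c, hc, hin⟩
    rw [hrep c, PySem.Chars.isIn_iff_infix] at hin
    exact ⟨c, (PySem.Set.mem_ofList v c).mp hc, hin⟩
  · rintro ⟨c, hc, hin⟩
    exact ⟨c, (PySem.Set.mem_ofList v c).mpr hc,
      by rw [hrep c, PySem.Chars.isIn_iff_infix]; exact hin⟩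

lemma aHasRepeat_eq_bQuadRun (value : String) : aHasRepeat value = bQuadRun value := by
  simp only [aHasRepeat, bQuadRun]
  set v := value.toList with hv
  by_cases h : 5 < v.length
  · rw [if_pos h, bAny_eq_hasQuad, ← natWin_eq_hasQuad, decide_eq_true h, Bool.true_and]
    unfold natWin
    rw [PySem.List.pyRange_one]
    have ht : ((v.length : Int) - 3 - 0).toNat = v.length - 3 := by omega
    rw [ht, List.any_map]
    congr 1
    funext k
    have e1 : (0 : Int) + (k : Int) = ((k : Nat) : Int) := by omega
    have e2 : ((k : Int)) + 1 = (((k + 1) : Nat) : Int) := by omega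
    have e3 : ((k : Int)) + 2 = (((k + 2) : Nat) : Int) := by omega
    have e4 : ((k : Int)) + 3 = (((k + 3) : Nat) : Int) := by omega
    simp only [Function.comp, e1, e2, e3, e4, PySem.List.pyGetD_natCast]
  · rw [if_neg h, decide_eq_false h, Bool.false_and]

lemma bad_eq_not_ok (c : String) :
    (c != "" && (c.toList.length != 3 || !(PySem.Str.strIsalpha c))) = !(bCodeOk c) := by
  unfold bCodeOk
  cases hb : (c == "") <;> cases h3 : (c.toList.length == 3) <;>
    cases ha : PySem.Str.strIsalpha c <;> simp_all [bne, String.length_toList]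

-- ===== VERDICT (by name: the statement is the Claim_ definition above) =====
theorem is_mrz_obviously_corrupted_py_spec : Claim_equal_is_mrz_obviously_corrupted_py := by
  intro m _
  show is_mrz_obviously_corrupted_py m = is_mrz_obviously_corrupted_py_alt m
  unfold is_mrz_obviously_corrupted_py is_mrz_obviously_corrupted_py_alt
  simp only [aHasRepeat_eq_bQuadRun, List.any_cons, List.any_nil, Bool.or_false,
    bad_eq_not_ok, Bool.not_and]
  cases bQuadRun (pvGetStr m "names") || bQuadRun (pvGetStr m "surname") <;> simp
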